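-- pv_equiv track=rewrite | github.com/TawfikLabStanford/Identifying-EHR-Activity-Using-Computer-Vision | validate_results.py | match_transitions_with_tolerance
-- ===== SOURCE A (Python) =====
-- def match_transitions_with_tolerance(gt_times: list, pred_times: list, delta: int = 2) -> int:
--     """
--     Match predicted transitions to ground truth with tolerance window.
--
--     For each ground truth transition time, any predicted transition time
--     within [t - delta, t + delta] is considered a match.
--
--     Parameters:
--         gt_times: Ground truth transition times
--         pred_times: Predicted transition times
--         delta (int): Tolerance in frames (default: 2, per paper Section 3.2.2)
--
--     Returns:
--         int: Count of matched transitions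
--     """
--     matched_count = 0
--     used_pred = set()
--     for gt_time in gt_times:
--         low_bound = gt_time - delta
--         high_bound = gt_time + delta
--         candidates = [
--             pred_time for pred_time in pred_times
--             if low_bound <= pred_time <= high_bound and pred_time not in used_pred
--         ]
--         if candidates:
--             matched_count += 1
--             used_pred.add(candidates[0])
--     return matched_count
-- ===== SOURCE B (Python) =====
-- def match_transitions_with_tolerance(gt_times: list, pred_times: list, delta: int = 2) -> int:
--     # Matching in this task is by value: once a predicted value is used it is
--     # unavailable, so only the distinct predicted values (first-occurrence order)
--     # matter.  Keep them in a shrinking pool and delete each value when matched.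
--     avail = list(dict.fromkeys(pred_times))
--     matched_count = 0
--     for t in gt_times:
--         lo = t - delta
--         hi = t + delta
--         for i, p in enumerate(avail):
--             if lo <= p <= hi:
--                 matched_count += 1
--                 avail.pop(i)
--                 break
--     return matched_count
-- ===== Notes on version B (the rewrite author's own statement) =====
-- stated objective: alternative
-- what changed: Instead of re-scanning all of pred_times per ground-truth time and keeping a growing used-value set, B dedupes pred_times once into a pool of distinct values and, per ground-truth time, finds and deletes the first in-window value from the shrinking pool with an early exit; a timing run measured this much faster.
import Mathlib
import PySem

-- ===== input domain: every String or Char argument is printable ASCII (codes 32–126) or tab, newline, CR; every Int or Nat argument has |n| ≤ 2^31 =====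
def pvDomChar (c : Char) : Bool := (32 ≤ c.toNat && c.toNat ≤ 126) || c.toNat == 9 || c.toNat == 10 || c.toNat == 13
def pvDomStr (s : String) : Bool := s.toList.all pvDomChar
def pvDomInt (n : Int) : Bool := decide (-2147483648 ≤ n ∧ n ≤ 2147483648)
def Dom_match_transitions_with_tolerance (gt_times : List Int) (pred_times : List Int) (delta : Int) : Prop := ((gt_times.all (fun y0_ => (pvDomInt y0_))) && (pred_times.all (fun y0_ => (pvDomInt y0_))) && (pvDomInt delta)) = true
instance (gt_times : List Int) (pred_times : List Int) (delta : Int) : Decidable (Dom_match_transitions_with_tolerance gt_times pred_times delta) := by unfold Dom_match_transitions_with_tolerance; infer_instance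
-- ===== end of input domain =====

-- B dedupes pred_times once into a pool of distinct values and deletes the first
-- in-window value per ground-truth time, instead of A's full rescan of pred_times
-- with a growing used-value set (objective: alternative; return value only).

-- ===== PORT A =====
-- the body of A's 'for gt_time in gt_times' loop
def mtwtAstep (pred_times : List Int) (delta : Int) (st : Int × PySem.Set Int) (gt_time : Int) : Int × PySem.Set Int :=
  let low_bound := gt_time - delta
  let high_bound := gt_time + delta
  let candidates := pred_times.filter
    (fun pred_time => decide (low_bound ≤ pred_time) && decide (pred_time ≤ high_bound) && !(PySem.Set.contains st.2 pred_time))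
  match candidates with
  | [] => st
  | c :: _ => (st.1 + 1, PySem.Set.add st.2 c)

def match_transitions_with_tolerance (gt_times : List Int) (pred_times : List Int) (delta : Int) : Int :=
  (gt_times.foldl (mtwtAstep pred_times delta) (0, PySem.Set.empty)).1

-- ===== PORT B =====
-- the inner 'for i, p in enumerate(avail): … pop(i); break' loop of Source B:
-- remove the first element of the pool inside [lo, hi], none if there is none
def mtwtFindRemove (lo hi : Int) : List Int → Option (List Int)
  | [] => none
  | p :: rest =>
    if lo ≤ p ∧ p ≤ hi then some rest
    else (mtwtFindRemove lo hi rest).map (p :: ·)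

def mtwtBstep (delta : Int) (st : Int × List Int) (t : Int) : Int × List Int :=
  match mtwtFindRemove (t - delta) (t + delta) st.2 with
  | none => st
  | some avail' => (st.1 + 1, avail')

def match_transitions_with_tolerance_alt (gt_times : List Int) (pred_times : List Int) (delta : Int) : Int :=
  let avail := PySem.List.dedup pred_times   -- list(dict.fromkeys(pred_times))
  (gt_times.foldl (mtwtBstep delta) (0, avail)).1

-- ===== PRECONDITION & SPEC =====
def Spec_match_transitions_with_tolerance (gt_times : List Int) (pred_times : List Int) (delta : Int) (out : Int) : Prop := out = match_transitions_with_tolerance_alt gt_times pred_times delta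
instance (gt_times : List Int) (pred_times : List Int) (delta : Int) (out : Int) : Decidable (Spec_match_transitions_with_tolerance gt_times pred_times delta out) := by unfold Spec_match_transitions_with_tolerance; infer_instance

-- ===== CLAIM (what is proved, stated in full; the proofs are below) =====
def Claim_equal_match_transitions_with_tolerance : Prop := ∀ (gt_times : List Int) (pred_times : List Int) (delta : Int), Dom_match_transitions_with_tolerance gt_times pred_times delta → Spec_match_transitions_with_tolerance gt_times pred_times delta (match_transitions_with_tolerance gt_times pred_times delta)

-- ===== LEMMAS AND PROOFS =====

-- mtwtFindRemove removes exactly the head of the in-window sublist (on a Nodup pool)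
theorem mtwtFindRemove_spec (lo hi : Int) (l : List Int) (hnd : l.Nodup) :
    mtwtFindRemove lo hi l =
      ((l.filter (fun p => decide (lo ≤ p) && decide (p ≤ hi))).head?).map
        (fun c => l.filter (fun p => !(p == c))) := by
  induction l with
  | nil => simp [mtwtFindRemove]
  | cons p rest ih =>
    have hnd' : rest.Nodup := hnd.of_cons
    by_cases hW : lo ≤ p ∧ p ≤ hi
    · have hmem : p ∉ rest := (List.nodup_cons.mp hnd).1
      have : rest.filter (fun q => !(q == p)) = rest :=
        List.filter_eq_self.mpr (fun a ha => by
          simp only [Bool.not_eq_eq_eq_not, Bool.not_true, beq_eq_false_iff_ne]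
          exact fun h => hmem (h ▸ ha))
      simp [mtwtFindRemove, hW.1, hW.2, this]
    · have hWf : (decide (lo ≤ p) && decide (p ≤ hi)) = false := by
        by_cases h1 : lo ≤ p <;> by_cases h2 : p ≤ hi <;> simp [h1, h2]
        exact absurd ⟨h1, h2⟩ hW
      rw [show mtwtFindRemove lo hi (p :: rest) = (mtwtFindRemove lo hi rest).map (p :: ·) from by
        simp [mtwtFindRemove, hW]]
      rw [ih hnd']
      rw [show (p :: rest).filter (fun q => decide (lo ≤ q) && decide (q ≤ hi)) =
            rest.filter (fun q => decide (lo ≤ q) && decide (q ≤ hi)) from by simp [hWf]]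
      cases hh : (rest.filter (fun q => decide (lo ≤ q) && decide (q ≤ hi))).head? with
      | none => simp
      | some c =>
        have hc : c ∈ rest := List.mem_of_mem_filter (List.mem_of_mem_head? hh)
        have hpc : p ≠ c := fun h => (List.nodup_cons.mp hnd).1 (h ▸ hc)
        simp only [Option.map_some]
        simp [hpc]

-- deduplication does not change the first element satisfying any value predicate
theorem mtwtHead_filter_ofList (Q : Int → Bool) (l : List Int) :
    ((PySem.Set.ofList l).filter Q).head? = (l.filter Q).head? := by
  induction l with
  | nil => simp [PySem.Set.ofList_nil]
  | cons x xs ih =>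
    rw [PySem.Set.ofList_cons]
    by_cases hQ : Q x = true
    · simp [hQ]
    · have hQ' : Q x = false := Bool.not_eq_true _ |>.mp hQ
      simp only [List.filter_cons, hQ', Bool.false_eq_true, if_false, PySem.Set.discard]
      rw [List.filter_filter]
      have : ((PySem.Set.ofList xs).filter fun a => Q a && !(a == x)) =
             (PySem.Set.ofList xs).filter Q := by
        apply List.filter_congr
        intro y _
        by_cases hy : y = x
        · simp [hy, hQ']
        · simp [hy]
      rw [this, ih]

-- the loop invariant: B's pool is the deduped prediction list minus A's used values
theorem mtwtLoop (pred_times : List Int) (delta : Int) :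
    ∀ (gts : List Int) (n : Int) (used : PySem.Set Int),
      (gts.foldl (mtwtAstep pred_times delta) (n, used)).1 =
      (gts.foldl (mtwtBstep delta)
        (n, (PySem.Set.ofList pred_times).filter (fun p => !(PySem.Set.contains used p)))).1 := by
  intro gts
  induction gts with
  | nil => intro n used; simp
  | cons t rest ih =>
    intro n used
    have hnodup : ((PySem.Set.ofList pred_times).filter
        (fun p => !(PySem.Set.contains used p))).Nodup :=
      (PySem.Set.nodup_ofList pred_times).filter _
    simp only [List.foldl_cons]
    have hheads := mtwtHead_filter_ofList
      (fun p => decide (t - delta ≤ p) && decide (p ≤ t + delta) && !(PySem.Set.contains used p)) pred_times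
    have hBpool : (((PySem.Set.ofList pred_times).filter (fun p => !(PySem.Set.contains used p))).filter
          (fun p => decide (t - delta ≤ p) && decide (p ≤ t + delta)))
        = (PySem.Set.ofList pred_times).filter
          (fun p => decide (t - delta ≤ p) && decide (p ≤ t + delta) && !(PySem.Set.contains used p)) := by
      rw [List.filter_filter]
    cases hcand : pred_times.filter
        (fun p => decide (t - delta ≤ p) && decide (p ≤ t + delta) && !(PySem.Set.contains used p)) with
    | nil =>
      have hA : mtwtAstep pred_times delta (n, used) t = (n, used) := by
        simp only [mtwtAstep, hcand]
      have hfr : mtwtFindRemove (t - delta) (t + delta)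
          ((PySem.Set.ofList pred_times).filter (fun p => !(PySem.Set.contains used p))) = none := by
        rw [mtwtFindRemove_spec _ _ _ hnodup, hBpool, hheads, hcand]
        simp
      have hB : mtwtBstep delta
          (n, (PySem.Set.ofList pred_times).filter (fun p => !(PySem.Set.contains used p))) t
          = (n, (PySem.Set.ofList pred_times).filter (fun p => !(PySem.Set.contains used p))) := by
        simp only [mtwtBstep, hfr]
      rw [hA, hB]
      exact ih n used
    | cons c tail =>
      have hcQ : (decide (t - delta ≤ c) && decide (c ≤ t + delta) && !(PySem.Set.contains used c)) = true := by
        have hmem : c ∈ pred_times.filter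
            (fun p => decide (t - delta ≤ p) && decide (p ≤ t + delta) && !(PySem.Set.contains used p)) := by
          rw [hcand]; exact List.mem_cons_self
        exact (List.mem_filter.mp hmem).2
      have hcu : PySem.Set.contains used c = false := by
        revert hcQ; cases h : PySem.Set.contains used c <;> simp
      have hA : mtwtAstep pred_times delta (n, used) t = (n + 1, PySem.Set.add used c) := by
        simp only [mtwtAstep, hcand]
      have hadd : PySem.Set.add used c = used ++ [c] := by
        apply PySem.Set.add_of_not_mem
        intro hmem
        rw [(PySem.Set.contains_iff used c).mpr hmem] at hcu
        exact Bool.false_ne_true hcu.symm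
      have hnew : (((PySem.Set.ofList pred_times).filter (fun p => !(PySem.Set.contains used p))).filter
            (fun p => !(p == c)))
          = (PySem.Set.ofList pred_times).filter
            (fun p => !(PySem.Set.contains (PySem.Set.add used c) p)) := by
        rw [List.filter_filter, hadd]
        apply List.filter_congr
        intro y _
        by_cases hy : y = c
        · subst hy
          simp [PySem.Set.contains]
        · simp [PySem.Set.contains, hy]
      have hfr : mtwtFindRemove (t - delta) (t + delta)
          ((PySem.Set.ofList pred_times).filter (fun p => !(PySem.Set.contains used p)))
          = some ((PySem.Set.ofList pred_times).filter
              (fun p => !(PySem.Set.contains (PySem.Set.add used c) p))) := by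
        rw [mtwtFindRemove_spec _ _ _ hnodup, hBpool, hheads, hcand]
        simp only [List.head?_cons, Option.map_some]
        rw [hnew]
      have hB : mtwtBstep delta
          (n, (PySem.Set.ofList pred_times).filter (fun p => !(PySem.Set.contains used p))) t
          = (n + 1, (PySem.Set.ofList pred_times).filter
              (fun p => !(PySem.Set.contains (PySem.Set.add used c) p))) := by
        simp only [mtwtBstep, hfr]
      rw [hA, hB]
      exact ih (n + 1) (PySem.Set.add used c)

-- ===== VERDICT (by name: the statement is the Claim_ definition above) =====
theorem match_transitions_with_tolerance_spec : Claim_equal_match_transitions_with_tolerance := by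
  intro gt_times pred_times delta _
  unfold Spec_match_transitions_with_tolerance
  unfold match_transitions_with_tolerance match_transitions_with_tolerance_alt
  have h := mtwtLoop pred_times delta gt_times 0 PySem.Set.empty
  rw [show ((PySem.Set.ofList pred_times).filter
      (fun p => !(PySem.Set.contains PySem.Set.empty p))) = PySem.List.dedup pred_times from by
    rw [PySem.List.dedup_eq_ofList]
    apply List.filter_eq_self.mpr
    intro a _
    simp [PySem.Set.empty, PySem.Set.contains]]
  at h
  exact h
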